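-- pv_equiv track=rewrite | github.com/chongyi-zheng/stable_contrastive_rl | rlkit/util/fanova_util.py | remove_keys_with_nonunique_values
-- ===== SOURCE A (Python) =====
-- from collections import defaultdict, namedtuple
--
-- def get_dict_key_to_values(dict_list):
--     """
--     Given a list of dictionaries, return a dictionary. Keys are the set
--     of keys in the list of dictionaries. Values are the set of values
--     that seen with that key across every dictionary.
--     :param all_variants:
--     :return:
--     """
--     dict_key_to_values = defaultdict(set)
--     for d in dict_list:
--         for k, v in d.items():
--             if type(v) == list:
--                 v = str(v)
--             dict_key_to_values[k].add(v)
--     return dict_key_to_values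
--
-- def remove_keys_with_nonunique_values(dict_list, params_to_ignore=None):
--     """
--     Given a list of dictionaries, remove all keys from the dictionaries where
--     all the dictionaries have the same value for that key.
--     :param dict_list:
--     :param params_to_ignore:
--     :return:
--     """
--     if params_to_ignore is None:
--         params_to_ignore = []
--     key_to_values = get_dict_key_to_values(dict_list)
--     filtered_dicts = []
--     for d in dict_list:
--         new_d = {
--             k: v for k, v in d.items()
--             if len(key_to_values[k]) > 1 and k not in params_to_ignore
--         }
--         filtered_dicts.append(new_d)
--     return filtered_dicts
-- ===== SOURCE B (Python) =====
-- def _varies(dict_list, k):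
--     """True iff key k takes at least two distinct (list-normalized) values
--     across the dicts that contain it: rescan dict_list comparing each value
--     against the first one seen, stopping at the first mismatch."""
--     first = None
--     seen_one = False
--     for d in dict_list:
--         if k in d:
--             v = d[k]
--             if type(v) == list:
--                 v = str(v)
--             if not seen_one:
--                 first, seen_one = v, True
--             elif v != first:
--                 return True
--     return False
--
--
-- def remove_keys_with_nonunique_values(dict_list, params_to_ignore=None):
--     ignore = params_to_ignore if params_to_ignore is not None else []
--     # stage 1: the distinct keys, in first-appearance order
--     all_keys = []
--     for d in dict_list:
--         for k in d:
--             if k not in all_keys: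
--                 all_keys.append(k)
--     # stage 2: per key, rescan the list to decide whether it varies
--     variable_keys = [k for k in all_keys
--                      if k not in ignore and _varies(dict_list, k)]
--     # stage 3: keep only the precomputed variable keys
--     return [{k: v for k, v in d.items() if k in variable_keys}
--             for d in dict_list]
-- ===== Notes on version B (the rewrite author's own statement) =====
-- stated objective: alternative
-- what changed: A builds a key-to-set-of-values index in one pass and filters by len(set)>1; B works in three stages: collect the distinct keys, then for each key rescan the dict list comparing values against the first one seen with an early exit at the first mismatch, then filter each dict by the precomputed variable-key list.
import Mathlib
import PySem

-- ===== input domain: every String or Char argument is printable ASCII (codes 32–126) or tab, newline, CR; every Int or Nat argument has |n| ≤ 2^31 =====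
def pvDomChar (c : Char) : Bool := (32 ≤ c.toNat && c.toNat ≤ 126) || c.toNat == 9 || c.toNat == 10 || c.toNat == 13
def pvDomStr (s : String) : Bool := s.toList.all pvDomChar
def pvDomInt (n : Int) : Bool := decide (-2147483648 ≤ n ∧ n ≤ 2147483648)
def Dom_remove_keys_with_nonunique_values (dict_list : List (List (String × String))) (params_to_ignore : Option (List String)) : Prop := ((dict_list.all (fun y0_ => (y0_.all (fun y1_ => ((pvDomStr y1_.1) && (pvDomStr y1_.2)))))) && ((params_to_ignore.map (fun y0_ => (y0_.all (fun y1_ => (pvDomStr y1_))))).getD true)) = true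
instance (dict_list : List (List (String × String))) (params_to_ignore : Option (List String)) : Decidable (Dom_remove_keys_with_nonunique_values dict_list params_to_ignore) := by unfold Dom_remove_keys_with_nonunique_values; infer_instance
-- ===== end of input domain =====

-- B replaces A's single index-building pass (key → set of all values, kept dict-by-dict with len>1
-- lookups) by three staged passes: collect the distinct keys, then PER KEY rescan the whole dict
-- list with an early exit at the first value that differs from the first one seen, then filter each
-- dict by the precomputed variable-key list. Alternative decomposition, same asymptotic cost.
-- Values are strings under the type convention, so A's `type(v) == list` normalization branch never
-- fires and is ported as the identity (dropped) in both ports.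

-- ===== PORT A =====
-- get_dict_key_to_values: defaultdict(set) filled by iterating every dict's items
def pvGetDictKeyToValues (dict_list : List (List (String × String))) : PySem.Dict String (PySem.Set String) :=
  dict_list.foldl
    (fun acc d => d.foldl
      (fun acc kv => acc.modify kv.1 PySem.Set.empty (fun s => PySem.Set.add s kv.2)) acc)
    PySem.Dict.empty

def remove_keys_with_nonunique_values (dict_list : List (List (String × String))) (params_to_ignore : Option (List String)) : List (List (String × String)) :=
  let params := params_to_ignore.getD []
  let key_to_values := pvGetDictKeyToValues dict_list
  dict_list.foldl
    (fun filtered_dicts d =>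
      filtered_dicts ++
        [d.filter (fun kv =>
          decide (1 < (key_to_values.getD kv.1 PySem.Set.empty).length) && !params.contains kv.1)])
    []

-- ===== PORT B =====
-- Pre_ below restricts to genuine dict representations (unique keys per inner list), so Python's
-- `k in d` / `d[k]` on a dict are ported exactly as first-match search on the association list.
-- _varies: rescan the dict list, comparing each value under k against the first one seen (`first`,
-- with the `seen_one` flag as the Option); early `return True` at the first mismatch
def pvVaries (k : String) (ds : List (List (String × String))) (first : Option String) : Bool :=
  match ds with
  | [] => false
  | d :: rest =>
      match (d.find? (fun kv => kv.1 == k)).map Prod.snd with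
      | none => pvVaries k rest first
      | some v =>
          match first with
          | none => pvVaries k rest (some v)
          | some f => if v != f then true else pvVaries k rest (some f)

-- stage 1: the distinct keys in first-appearance order (`if k not in all_keys: all_keys.append(k)`
-- is exactly PySem.Set.add on the accumulator list)
def pvAllKeys (dict_list : List (List (String × String))) : List String :=
  dict_list.foldl (fun acc d => d.foldl (fun acc kv => PySem.Set.add acc kv.1) acc) []

def remove_keys_with_nonunique_values_alt (dict_list : List (List (String × String))) (params_to_ignore : Option (List String)) : List (List (String × String)) :=
  let ignore := params_to_ignore.getD []
  let variable_keys := (pvAllKeys dict_list).filter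
    (fun k => !ignore.contains k && pvVaries k dict_list none)
  dict_list.map (fun d => d.filter (fun kv => variable_keys.contains kv.1))

-- ===== PRECONDITION & SPEC =====
-- Pre_ excludes association lists carrying a duplicate key inside one inner list: those do not
-- represent any Python dict (dict keys are unique), so neither program's behaviour on them is
-- specified by the Python source.
def Pre_remove_keys_with_nonunique_values (dict_list : List (List (String × String))) (params_to_ignore : Option (List String)) : Prop :=
  ∀ d ∈ dict_list, (d.map Prod.fst).Nodup
instance (dict_list : List (List (String × String))) (params_to_ignore : Option (List String)) : Decidable (Pre_remove_keys_with_nonunique_values dict_list params_to_ignore) := by unfold Pre_remove_keys_with_nonunique_values; infer_instance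

def pvWitness_remove_keys_with_nonunique_values : (List (List (String × String))) × Option (List String) :=
  ([[("a", "1"), ("b", "2")], [("a", "1"), ("b", "3")]], some ["b"])

def Spec_remove_keys_with_nonunique_values (dict_list : List (List (String × String))) (params_to_ignore : Option (List String)) (out : List (List (String × String))) : Prop := out = remove_keys_with_nonunique_values_alt dict_list params_to_ignore
instance (dict_list : List (List (String × String))) (params_to_ignore : Option (List String)) (out : List (List (String × String))) : Decidable (Spec_remove_keys_with_nonunique_values dict_list params_to_ignore out) := by unfold Spec_remove_keys_with_nonunique_values; infer_instance

-- ===== CLAIM (what is proved, stated in full; the proofs are below) =====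
def Claim_equal_remove_keys_with_nonunique_values : Prop := ∀ (dict_list : List (List (String × String))) (params_to_ignore : Option (List String)), Dom_remove_keys_with_nonunique_values dict_list params_to_ignore → Pre_remove_keys_with_nonunique_values dict_list params_to_ignore → Spec_remove_keys_with_nonunique_values dict_list params_to_ignore (remove_keys_with_nonunique_values dict_list params_to_ignore)

-- ===== LEMMAS AND PROOFS =====

-- all values recorded under key k across the whole list, in encounter order (proof-side helper)
def pvValsOf (dict_list : List (List (String × String))) (k : String) : List String :=
  dict_list.flatMap (fun d => (d.filter (fun kv => kv.1 == k)).map Prod.snd)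

-- ---- A-side characterisation: the index at one key holds exactly the values seen under it ----
lemma getD_inner_fold (k : String) (l : List (String × String)) (d : PySem.Dict String (PySem.Set String)) :
    ((l.foldl (fun acc kv => acc.modify kv.1 PySem.Set.empty (fun s => PySem.Set.add s kv.2)) d).getD k PySem.Set.empty)
      = PySem.Set.update (d.getD k PySem.Set.empty) ((l.filter (fun kv => kv.1 == k)).map Prod.snd) := by
  induction l generalizing d with
  | nil => rfl
  | cons kv t ih =>
      simp only [List.foldl_cons, ih, PySem.Dict.getD_modify, List.filter_cons]
      by_cases h : k = kv.1
      · subst h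
        simp [PySem.Set.update, List.foldl_cons]
      · have hne : (kv.1 == k) = false := by simp [Ne.symm h]
        simp [h, hne]

lemma getD_key_to_values (dict_list : List (List (String × String))) (k : String) :
    (pvGetDictKeyToValues dict_list).getD k PySem.Set.empty = PySem.Set.ofList (pvValsOf dict_list k) := by
  rw [pvGetDictKeyToValues]
  have : ∀ (ds : List (List (String × String))) (d : PySem.Dict String (PySem.Set String)),
      ((ds.foldl (fun acc d' => d'.foldl (fun acc kv => acc.modify kv.1 PySem.Set.empty (fun s => PySem.Set.add s kv.2)) acc) d).getD k PySem.Set.empty)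
        = PySem.Set.update (d.getD k PySem.Set.empty) (pvValsOf ds k) := by
    intro ds
    induction ds with
    | nil => intro d; rfl
    | cons d0 t ih =>
        intro d
        simp only [List.foldl_cons, ih, getD_inner_fold, pvValsOf, List.flatMap_cons]
        simp [PySem.Set.update, List.foldl_append]
  rw [this]
  rfl

-- a Nodup list whose elements are all equal has at most one element
lemma length_le_one_of_all_eq {α : Type} (l : List α) (a : α) (hnd : l.Nodup)
    (h : ∀ x ∈ l, x = a) : l.length ≤ 1 := by
  match l with
  | [] => simp
  | [x] => simp
  | x :: y :: t =>
      exfalso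
      have hx : x = a := h x (by simp)
      have hy : y = a := h y (by simp)
      simp [hx, hy] at hnd

-- len(set of values) > 1  ↔  some later value differs from the first
lemma one_lt_length_ofList (l : List String) :
    decide (1 < (PySem.Set.ofList l).length)
      = (match l with | [] => false | v0 :: rest => rest.any (fun v => v != v0)) := by
  match l with
  | [] => rfl
  | v0 :: rest =>
      simp only []
      by_cases h : ∃ x ∈ rest, x ≠ v0
      · obtain ⟨x, hx, hxne⟩ := h
        have h1 : x ∈ PySem.Set.ofList (v0 :: rest) := by
          rw [PySem.Set.mem_ofList]; exact List.mem_cons_of_mem _ hx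
        have h2 : v0 ∈ PySem.Set.ofList (v0 :: rest) := by
          rw [PySem.Set.mem_ofList]; exact List.mem_cons_self ..
        have hlen : 1 < (PySem.Set.ofList (v0 :: rest)).length := by
          match hS : PySem.Set.ofList (v0 :: rest) with
          | [] => rw [hS] at h1; simp at h1
          | [a] =>
              rw [hS] at h1 h2; simp at h1 h2; exact absurd (h1.trans h2.symm) hxne
          | a :: b :: t => simp
        simp only [hlen, decide_true]
        symm; rw [List.any_eq_true]
        exact ⟨x, hx, by simp [hxne]⟩
      · push Not at h
        have hall : ∀ x ∈ PySem.Set.ofList (v0 :: rest), x = v0 := by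
          intro x hx
          rw [PySem.Set.mem_ofList] at hx
          rcases List.mem_cons.mp hx with hx' | hx'
          · exact hx'
          · exact h x hx'
        have hle := length_le_one_of_all_eq _ v0 (PySem.Set.nodup_ofList _) hall
        have : ¬ (1 < (PySem.Set.ofList (v0 :: rest)).length) := by omega
        simp only [this, decide_false]
        symm; rw [List.any_eq_false]
        intro x hx
        simp [h x hx]

-- ---- B-side characterisation ----
-- under unique keys, filtering one dict at k yields exactly the first-match lookup
lemma filter_key_eq_find (k : String) (d : List (String × String)) (hnd : (d.map Prod.fst).Nodup) :
    (d.filter (fun kv => kv.1 == k)).map Prod.snd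
      = ((d.find? (fun kv => kv.1 == k)).map Prod.snd).toList := by
  induction d with
  | nil => rfl
  | cons kv t ih =>
      simp only [List.map_cons, List.nodup_cons] at hnd
      by_cases h : kv.1 = k
      · have ht : t.filter (fun kv' => kv'.1 == k) = [] := by
          rw [List.filter_eq_nil_iff]
          intro x hx hbeq
          exact hnd.1 (by rw [h, ← (beq_iff_eq ..).mp hbeq]; exact List.mem_map_of_mem hx)
        simp [h, ht]
      · have hne : (kv.1 == k) = false := by simp [h]
        simp only [List.filter_cons, List.find?_cons, hne]
        exact ih hnd.2

-- the values under k, dict by dict, as first-match lookups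
def pvValsOf' (dict_list : List (List (String × String))) (k : String) : List String :=
  dict_list.flatMap (fun d => ((d.find? (fun kv => kv.1 == k)).map Prod.snd).toList)

lemma valsOf_eq_valsOf' (dict_list : List (List (String × String))) (k : String)
    (hpre : ∀ d ∈ dict_list, (d.map Prod.fst).Nodup) :
    pvValsOf dict_list k = pvValsOf' dict_list k := by
  unfold pvValsOf pvValsOf'
  rw [List.flatMap_def, List.flatMap_def]
  exact congrArg List.flatten
    (List.map_congr_left (fun d hd => filter_key_eq_find k d (hpre d hd)))

lemma pvVaries_some (k : String) (ds : List (List (String × String))) (f : String) :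
    pvVaries k ds (some f) = (pvValsOf' ds k).any (fun v => v != f) := by
  induction ds with
  | nil => rfl
  | cons d rest ih =>
      rw [pvVaries]
      cases hfind : (d.find? (fun kv => kv.1 == k)).map Prod.snd with
      | none => simp [pvValsOf', List.flatMap_cons, hfind, ih]
      | some v =>
          by_cases hv : v = f
          · simp [pvValsOf', List.flatMap_cons, hfind, hv, ih]
          · simp [pvValsOf', List.flatMap_cons, hfind, hv]

lemma pvVaries_none (k : String) (ds : List (List (String × String))) :
    pvVaries k ds none
      = (match pvValsOf' ds k with | [] => false | v0 :: rest => rest.any (fun v => v != v0)) := by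
  induction ds with
  | nil => rfl
  | cons d rest ih =>
      rw [pvVaries]
      cases hfind : (d.find? (fun kv => kv.1 == k)).map Prod.snd with
      | none => simp [pvValsOf', List.flatMap_cons, hfind]; exact ih
      | some v => simp [pvValsOf', List.flatMap_cons, hfind, pvVaries_some]

-- every key occurring in some dict is collected by stage 1
lemma mem_allKeys_fold (ds : List (List (String × String))) (acc : List String) (y : String) :
    y ∈ ds.foldl (fun acc d => d.foldl (fun acc kv => PySem.Set.add acc kv.1) acc) acc
      ↔ y ∈ acc ∨ ∃ d ∈ ds, ∃ v, (y, v) ∈ d := by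
  induction ds generalizing acc with
  | nil => simp
  | cons d0 t ih =>
      have inner : d0.foldl (fun acc kv => PySem.Set.add acc kv.1) acc
          = PySem.Set.update acc (d0.map Prod.fst) := by
        rw [PySem.Set.update, ← List.foldl_map]
      simp only [List.foldl_cons, inner, ih, PySem.Set.mem_update, List.mem_map]
      constructor
      · rintro (((h | ⟨⟨k, v⟩, hkv, rfl⟩) | ⟨d, hd, v, hv⟩))
        · exact Or.inl h
        · exact Or.inr ⟨d0, List.mem_cons_self .., v, hkv⟩
        · exact Or.inr ⟨d, List.mem_cons_of_mem _ hd, v, hv⟩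
      · rintro (h | ⟨d, hd, v, hv⟩)
        · exact Or.inl (Or.inl h)
        · rcases List.mem_cons.mp hd with rfl | hd'
          · exact Or.inl (Or.inr ⟨(y, v), hv, rfl⟩)
          · exact Or.inr ⟨d, hd', v, hv⟩

lemma mem_allKeys_of_mem (dict_list : List (List (String × String))) (kv : String × String)
    (d : List (String × String)) (hd : d ∈ dict_list) (hkv : kv ∈ d) :
    kv.1 ∈ pvAllKeys dict_list := by
  rw [pvAllKeys, mem_allKeys_fold]
  exact Or.inr ⟨d, hd, kv.2, hkv⟩

-- the two keep-decisions agree on every key actually present in some dict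
lemma keep_cond_eq (dict_list : List (List (String × String))) (ignore : List String)
    (hpre : ∀ d ∈ dict_list, (d.map Prod.fst).Nodup)
    (kv : String × String) (d : List (String × String)) (hd : d ∈ dict_list) (hkv : kv ∈ d) :
    (decide (1 < ((pvGetDictKeyToValues dict_list).getD kv.1 PySem.Set.empty).length) && !ignore.contains kv.1)
      = ((pvAllKeys dict_list).filter
          (fun k => !ignore.contains k && pvVaries k dict_list none)).contains kv.1 := by
  have hmem : kv.1 ∈ pvAllKeys dict_list := mem_allKeys_of_mem dict_list kv d hd hkv
  have hrhs : ((pvAllKeys dict_list).filter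
          (fun k => !ignore.contains k && pvVaries k dict_list none)).contains kv.1
      = (!ignore.contains kv.1 && pvVaries kv.1 dict_list none) := by
    by_cases hp : (!ignore.contains kv.1 && pvVaries kv.1 dict_list none) = true
    · rw [hp]
      exact (PySem.Set.contains_iff _ _).mpr (List.mem_filter.mpr ⟨hmem, hp⟩)
    · rw [eq_false_of_ne_true hp]
      by_contra hc
      rw [← ne_eq, Bool.ne_false_iff] at hc
      exact hp (List.mem_filter.mp ((PySem.Set.contains_iff _ _).mp hc)).2
  rw [hrhs, getD_key_to_values, one_lt_length_ofList, valsOf_eq_valsOf' _ _ hpre,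
    ← pvVaries_none, Bool.and_comm]

-- ===== VERDICT (by name: the statement is the Claim_ definition above) =====
theorem remove_keys_with_nonunique_values_spec : Claim_equal_remove_keys_with_nonunique_values := by
  intro dict_list params_to_ignore _ hpre
  show _ = _
  rw [remove_keys_with_nonunique_values, remove_keys_with_nonunique_values_alt]
  rw [PySem.List.foldl_append_singleton_eq_map]
  apply List.map_congr_left
  intro d hd
  apply List.filter_congr
  intro kv hkv
  exact keep_cond_eq dict_list _ hpre kv d hd hkv
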